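-- pv_equiv track=rewrite | github.com/YuJinUk/Algorithm | 프로그래머스/1/82612. 부족한 금액 계산하기/부족한 금액 계산하기.py | solution
-- ===== SOURCE A (Python) =====
-- def solution(price, money, count):
--     answer = -1
--     a = 0
--     for i in range(1,count+1):
--         a += price * i
--     if money >= a :
--         return 0
--     else:
--         return a-money
-- ===== SOURCE B (Python) =====
-- def solution(price, money, count):
--     total = price * count * (count + 1) // 2 if count > 0 else 0
--     return max(total - money, 0)
-- ===== Notes on version B (the rewrite author's own statement) =====
-- stated objective: faster
-- what changed: Replaced the O(count) summation loop with the arithmetic-series closed form price*count*(count+1)//2 and the if/else with max(total-money, 0).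
import Mathlib
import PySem

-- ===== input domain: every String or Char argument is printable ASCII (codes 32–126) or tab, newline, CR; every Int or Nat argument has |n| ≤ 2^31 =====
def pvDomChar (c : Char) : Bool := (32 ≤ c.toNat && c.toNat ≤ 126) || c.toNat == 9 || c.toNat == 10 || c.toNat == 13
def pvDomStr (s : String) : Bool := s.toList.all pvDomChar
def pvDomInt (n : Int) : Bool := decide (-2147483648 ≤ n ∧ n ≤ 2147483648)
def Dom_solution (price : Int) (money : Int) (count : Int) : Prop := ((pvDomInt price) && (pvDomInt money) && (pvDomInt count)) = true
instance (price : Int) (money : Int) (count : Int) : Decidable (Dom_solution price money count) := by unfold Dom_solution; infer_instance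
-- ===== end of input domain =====

-- B replaces A's O(count) summation loop with the O(1) arithmetic-series closed form (objective: faster).

-- ===== PORT A =====
def solution (price : Int) (money : Int) (count : Int) : Int :=
  let a := (PySem.List.pyRange 1 (count + 1) 1).foldl (fun a i => a + price * i) 0
  if money ≥ a then 0 else a - money

-- ===== PORT B =====
def solution_alt (price : Int) (money : Int) (count : Int) : Int :=
  let total := if count > 0 then PySem.Int.floordiv (price * count * (count + 1)) 2 else 0
  max (total - money) 0

-- ===== PRECONDITION & SPEC =====
def Spec_solution (price : Int) (money : Int) (count : Int) (out : Int) : Prop := out = solution_alt price money count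
instance (price : Int) (money : Int) (count : Int) (out : Int) : Decidable (Spec_solution price money count out) := by unfold Spec_solution; infer_instance

-- ===== CLAIM (what is proved, stated in full; the proofs are below) =====
def Claim_equal_solution : Prop := ∀ (price : Int) (money : Int) (count : Int), Dom_solution price money count → Spec_solution price money count (solution price money count)

-- ===== LEMMAS AND PROOFS =====

-- the loop's accumulated sum, doubled, is price*count*(count+1)
theorem pv_loop_sum (price : Int) (m : Nat) :
    2 * (PySem.List.pyRange 1 ((m : Int) + 1) 1).foldl (fun a i => a + price * i) 0
      = price * (m : Int) * ((m : Int) + 1) := by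
  induction m with
  | zero => simp [PySem.List.pyRange_one_eq_nil]
  | succ k ih =>
      have h : (PySem.List.pyRange 1 ((k : Int) + 1 + 1) 1)
          = PySem.List.pyRange 1 ((k : Int) + 1) 1 ++ [(k : Int) + 1] :=
        PySem.List.pyRange_one_succ_right (by omega)
      push_cast
      rw [h, List.foldl_append]
      simp only [List.foldl_cons, List.foldl_nil]
      push_cast at ih
      ring_nf
      ring_nf at ih
      linarith

theorem solution_spec_aux (price money count : Int) :
    solution price money count = solution_alt price money count := by
  unfold solution solution_alt
  by_cases hc : count > 0
  · have hm : count = ((count.toNat : Nat) : Int) := by omega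
    have hsum := pv_loop_sum price count.toNat
    rw [← hm] at hsum
    set a := (PySem.List.pyRange 1 (count + 1) 1).foldl (fun a i => a + price * i) 0 with ha
    have hfd : PySem.Int.floordiv (price * count * (count + 1)) 2 = a := by
      rw [PySem.Int.floordiv_eq_ediv_of_pos (by norm_num), ← hsum,
        Int.mul_ediv_cancel_left _ (by norm_num)]
    simp only [hc, if_pos]
    rw [hfd]
    omega
  · have hnil : PySem.List.pyRange 1 (count + 1) 1 = [] :=
      PySem.List.pyRange_one_eq_nil (by omega)
    rw [hnil]
    simp only [List.foldl_nil, if_neg hc]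
    omega

-- ===== VERDICT (by name: the statement is the Claim_ definition above) =====
theorem solution_spec : Claim_equal_solution := by
  intro price money count _
  exact solution_spec_aux price money count
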